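-- pv_equiv track=rewrite | github.com/isacko27/TOOLS | curso python/PYTHON ISAAC/soluciones/Tarea4_Aarón_Salas.py | elimina_espacios
-- ===== SOURCE A (Python) =====
-- def elimina_espacios (string):
--   stringf = ""
--   nespacios = 0
--   for elemento in string:                  #VERIFICAR SI HAY ESPACIOS EN BLANCO EN EL STRING
--       if elemento == " ":
--           nespacios =  nespacios + 1       #SUMAR EL NÚMERO DE ESPACIOS QUE HAY EN EL STRING
--       else:
--           stringf = stringf + elemento
--   return stringf, nespacios
-- ===== SOURCE B (Python) =====
-- def elimina_espacios(string):
--     resultado = string.replace(" ", "")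
--     return resultado, len(string) - len(resultado)
-- ===== Notes on version B (the rewrite author's own statement) =====
-- stated objective: faster
-- what changed: Replaces A's accumulating character loop (quadratic repeated string concatenation that also tallies spaces) with a single str.replace call, deriving the space count as a difference of lengths, never scanning for spaces.
import Mathlib
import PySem

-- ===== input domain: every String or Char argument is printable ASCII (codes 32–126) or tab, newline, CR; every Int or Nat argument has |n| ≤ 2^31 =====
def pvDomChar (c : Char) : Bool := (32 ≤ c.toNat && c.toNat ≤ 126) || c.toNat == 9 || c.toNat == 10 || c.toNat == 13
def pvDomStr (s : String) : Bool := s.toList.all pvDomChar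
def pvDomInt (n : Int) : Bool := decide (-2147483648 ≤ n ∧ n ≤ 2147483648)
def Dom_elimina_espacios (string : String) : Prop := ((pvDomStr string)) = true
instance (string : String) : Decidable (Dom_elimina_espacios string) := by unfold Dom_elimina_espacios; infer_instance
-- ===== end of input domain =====

-- B computes the cleaned string with one str.replace call and derives the space
-- count as a difference of lengths (measured faster: avoids repeated concatenation).


-- ===== PORT A =====
-- single loop over the characters: accumulate the non-space string, count spaces
def elimina_espacios (string : String) : String × Int :=
  string.toList.foldl
    (fun (st : String × Int) elemento =>
      if elemento = ' ' then (st.1, st.2 + 1) else (st.1.push elemento, st.2))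
    ("", 0)

-- ===== PORT B =====
def elimina_espacios_alt (string : String) : String × Int :=
  let resultado := PySem.Str.replace string " " ""
  (resultado, PySem.Str.len string - PySem.Str.len resultado)

-- ===== PRECONDITION & SPEC =====
def Spec_elimina_espacios (string : String) (out : String × Int) : Prop := out = elimina_espacios_alt string
instance (string : String) (out : String × Int) : Decidable (Spec_elimina_espacios string out) := by unfold Spec_elimina_espacios; infer_instance

-- ===== CLAIM (what is proved, stated in full; the proofs are below) =====
def Claim_equal_elimina_espacios : Prop := ∀ (string : String), Dom_elimina_espacios string → Spec_elimina_espacios string (elimina_espacios string)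

-- ===== LEMMAS AND PROOFS =====

-- replace with pattern " " and empty replacement filters out spaces
theorem replace_go_space : ∀ (fuel : Nat) (l acc : List Char), l.length ≤ fuel →
    PySem.Chars.replace.go [' '] [] fuel l acc
      = acc.reverse ++ l.filter (fun c => !(c == ' ')) := by
  intro fuel
  induction fuel with
  | zero =>
    intro l acc h
    have : l = [] := List.length_eq_zero_iff.mp (Nat.le_zero.mp h)
    subst this
    simp [PySem.Chars.replace.go]
  | succ n ih =>
    intro l acc h
    cases l with
    | nil => simp [PySem.Chars.replace.go]
    | cons c t =>
      simp only [PySem.Chars.replace.go]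
      by_cases hc : c = ' '
      · subst hc
        have hpre : List.isPrefixOf [' '] (' ' :: t) = true := by
          simp [List.isPrefixOf]
        rw [if_pos hpre]
        simp only [List.length_cons] at h
        simp only [List.length_singleton, List.drop_one, List.tail_cons, List.reverse_nil,
          List.nil_append]
        rw [ih t acc (by omega)]
        simp
      · have hpre : List.isPrefixOf [' '] (c :: t) = false := by
          simp [List.isPrefixOf]
          exact fun hh => hc hh.symm
        rw [if_neg (by simp [hpre])]
        simp only [List.length_cons] at h
        rw [ih t (c :: acc) (by omega)]
        simp [hc]

theorem replace_space (s : String) :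
    PySem.Str.replace s " " "" = String.ofList (s.toList.filter (fun c => !(c == ' '))) := by
  unfold PySem.Str.replace PySem.Chars.replace
  have h1 : (" " : String).toList = [' '] := by decide
  have h2 : ("" : String).toList = [] := by decide
  rw [h1, h2]
  rw [if_neg (by simp)]
  rw [replace_go_space s.toList.length s.toList [] (le_refl _)]
  simp

-- A's loop invariant
theorem loopA (l : List Char) : ∀ (s0 : String) (n0 : Int),
    l.foldl
      (fun (st : String × Int) elemento =>
        if elemento = ' ' then (st.1, st.2 + 1) else (st.1.push elemento, st.2))
      (s0, n0)
    = (String.ofList (s0.toList ++ l.filter (fun c => !(c == ' '))),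
       n0 + (l.filter (fun c => c == ' ')).length) := by
  induction l with
  | nil =>
    intro s0 n0
    simp [String.ofList_toList]
  | cons c t ih =>
    intro s0 n0
    by_cases hc : c = ' '
    · subst hc
      simp only [List.foldl_cons]
      rw [ih]
      simp
      omega
    · simp only [List.foldl_cons, if_neg hc]
      rw [ih]
      simp [hc]

theorem filter_length_split (l : List Char) :
    (l.filter (fun c => c == ' ')).length + (l.filter (fun c => !(c == ' '))).length = l.length := by
  induction l with
  | nil => rfl
  | cons c t ih =>
    by_cases hc : c = ' ' <;> simp [hc] <;> omega

-- ===== VERDICT (by name: the statement is the Claim_ definition above) =====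
theorem elimina_espacios_spec : Claim_equal_elimina_espacios := by
  intro s _
  unfold Spec_elimina_espacios elimina_espacios elimina_espacios_alt
  rw [loopA, replace_space]
  have hlen := filter_length_split s.toList
  simp only []
  refine Prod.ext ?_ ?_
  · simp
  · simp only [PySem.Str.len_eq, String.toList_ofList]
    omega
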